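-- pv_equiv track=rewrite | github.com/basedosdados/pipelines | models/br_ibge_ppm/efetivo_rebanhos/code/json_to_parquet.py | join_dicts_by_keys
-- ===== SOURCE A (Python) =====
-- def join_dicts_by_keys(dict_list, keys):
--     result = {}
--     for d in dict_list:
--         key_tuple = tuple(d[k] for k in keys)
--         if key_tuple not in result:
--             result[key_tuple] = d
--         else:
--             result[key_tuple].update(d)
--     return list(result.values())
-- ===== SOURCE B (Python) =====
-- def join_dicts_by_keys(dict_list, keys):
--     # Group-then-reduce (two passes) instead of A's streaming dict merge.
--     # NOTE: unlike A, this does not mutate the input dicts; return value is identical.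
--     kts = [tuple(d[k] for k in keys) for d in dict_list]
--     result = []
--     for kt in dict.fromkeys(kts):
--         merged = {}
--         for d, t in zip(dict_list, kts):
--             if t == kt:
--                 merged.update(d)
--         result.append(merged)
--     return result
-- ===== Notes on version B (the rewrite author's own statement) =====
-- stated objective: alternative
-- what changed: Replaces A's single-pass streaming merge into a tuple-keyed result dict with a group-then-reduce decomposition: compute all key tuples once, take their first-occurrence order with dict.fromkeys, and for each distinct tuple fold dict.update over the matching dicts starting from a fresh empty dict (so the input is not mutated; the return value is identical).
import Mathlib
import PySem

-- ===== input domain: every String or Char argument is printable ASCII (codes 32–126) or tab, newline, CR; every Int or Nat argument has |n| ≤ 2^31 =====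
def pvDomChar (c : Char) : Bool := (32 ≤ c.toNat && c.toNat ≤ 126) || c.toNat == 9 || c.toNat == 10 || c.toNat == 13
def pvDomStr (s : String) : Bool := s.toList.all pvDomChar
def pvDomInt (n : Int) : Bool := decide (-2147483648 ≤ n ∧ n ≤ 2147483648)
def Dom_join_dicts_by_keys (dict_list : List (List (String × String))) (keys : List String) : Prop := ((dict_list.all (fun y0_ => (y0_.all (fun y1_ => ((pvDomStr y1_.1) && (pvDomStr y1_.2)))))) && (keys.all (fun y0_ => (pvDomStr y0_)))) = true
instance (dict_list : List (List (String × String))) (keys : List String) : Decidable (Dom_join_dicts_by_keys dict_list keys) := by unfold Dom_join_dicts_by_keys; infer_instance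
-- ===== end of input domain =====

-- B replaces A's streaming merge into a tuple-keyed dict by a group-then-reduce decomposition
-- (collect key tuples, dedup them in first-seen order, merge each group from a fresh empty dict);
-- the return value is identical, but unlike A, B does not mutate the input dicts (A merges in place
-- into the first dict of each group) — the equivalence proved here is about the return value only.

-- ===== PORT A =====
-- key tuple d[k] for k in keys; Pre_ guarantees every k is present, so the "" default is never used
def pvKeyTuple (keys : List String) (d : List (String × String)) : List String :=
  keys.map (fun k => (PySem.Dict.mk d).getD k "")

def join_dicts_by_keys (dict_list : List (List (String × String))) (keys : List String) : List (List (String × String)) :=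
  ((dict_list.foldl
      (fun result d =>
        let kt := pvKeyTuple keys d
        if result.contains kt = false then
          result.insert kt (PySem.Dict.mk d)
        else
          result.insert kt ((result.getD kt PySem.Dict.empty).update d))
      (PySem.Dict.empty : PySem.Dict (List String) (PySem.Dict String String))).values).map
    PySem.Dict.items

-- ===== PORT B =====
def join_dicts_by_keys_alt (dict_list : List (List (String × String))) (keys : List String) : List (List (String × String)) :=
  let kts := dict_list.map (pvKeyTuple keys)
  (PySem.List.dedup kts).map (fun kt =>
    ((dict_list.zip kts).foldl
        (fun m p => if p.2 = kt then m.update p.1 else m)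
        (PySem.Dict.empty : PySem.Dict String String)).items)

-- ===== PRECONDITION & SPEC =====
-- Pre_ excludes (a) inner lists with duplicate keys, which are not the encoding of any Python dict
-- (the type convention encodes a dict as an association list with DISTINCT keys), and (b) inputs in
-- which some key of `keys` is missing from some dict, on which Python A raises KeyError.
def Pre_join_dicts_by_keys (dict_list : List (List (String × String))) (keys : List String) : Prop :=
  ∀ d ∈ dict_list, (d.map Prod.fst).Nodup ∧ ∀ k ∈ keys, k ∈ d.map Prod.fst
instance (dict_list : List (List (String × String))) (keys : List String) : Decidable (Pre_join_dicts_by_keys dict_list keys) := by unfold Pre_join_dicts_by_keys; infer_instance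

def pvWitness_join_dicts_by_keys : (List (List (String × String))) × List String :=
  ([[("a", "1"), ("b", "x")], [("a", "1"), ("c", "y")], [("a", "2"), ("b", "z")]], ["a"])

def Spec_join_dicts_by_keys (dict_list : List (List (String × String))) (keys : List String) (out : List (List (String × String))) : Prop := out = join_dicts_by_keys_alt dict_list keys
instance (dict_list : List (List (String × String))) (keys : List String) (out : List (List (String × String))) : Decidable (Spec_join_dicts_by_keys dict_list keys out) := by unfold Spec_join_dicts_by_keys; infer_instance

-- ===== CLAIM (what is proved, stated in full; the proofs are below) =====
def Claim_equal_join_dicts_by_keys : Prop := ∀ (dict_list : List (List (String × String))) (keys : List String), Dom_join_dicts_by_keys dict_list keys → Pre_join_dicts_by_keys dict_list keys → Spec_join_dicts_by_keys dict_list keys (join_dicts_by_keys dict_list keys)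

-- ===== LEMMAS AND PROOFS =====

-- the merged dict of the group of `t` : fold update over the members of `l` whose key tuple is `t`
def pvMerge (keys : List String) (t : List String) (l : List (List (String × String))) : PySem.Dict String String :=
  (l.filter (fun d => pvKeyTuple keys d == t)).foldl (fun m d => m.update d) PySem.Dict.empty

lemma pv_update_empty (d : List (String × String)) (h : (d.map Prod.fst).Nodup) :
    PySem.Dict.update (PySem.Dict.empty : PySem.Dict String String) d = PySem.Dict.mk d := by
  apply PySem.Dict.ext
  have hfresh : ∀ p ∈ d, (PySem.Dict.empty : PySem.Dict String String).contains p.1 = false :=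
    fun p _ => PySem.Dict.contains_empty p.1
  have := PySem.Dict.items_foldl_insert_fresh d Prod.fst Prod.snd
    (PySem.Dict.empty : PySem.Dict String String) hfresh h
  simpa [PySem.Dict.update] using this

lemma pv_dedup_append {α : Type} [BEq α] [LawfulBEq α] (xs : List α) (x : α) :
    PySem.List.dedup (xs ++ [x]) =
      if x ∈ xs then PySem.List.dedup xs else PySem.List.dedup xs ++ [x] := by
  simp only [PySem.List.dedup_eq_ofList, PySem.Set.ofList, List.foldl_append, List.foldl_cons,
    List.foldl_nil]
  rw [PySem.Set.add]
  by_cases h : x ∈ xs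
  · have hc : (List.foldl PySem.Set.add PySem.Set.empty xs).contains x = true := by
      rw [PySem.Set.contains]
      exact List.elem_eq_true_of_mem ((PySem.Set.mem_ofList xs x).mpr h)
    rw [if_pos hc, if_pos h]
  · have hc : (List.foldl PySem.Set.add PySem.Set.empty xs).contains x = false := by
      rw [PySem.Set.contains]
      by_contra hne
      exact h ((PySem.Set.mem_ofList xs x).mp
        (List.mem_of_elem_eq_true (Bool.of_not_eq_false hne)))
    rw [if_neg (by rw [hc]; simp), if_neg h]

lemma pvMerge_append (keys t : List String) (l : List (List (String × String))) (d : List (String × String)) :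
    pvMerge keys t (l ++ [d]) =
      if pvKeyTuple keys d = t then (pvMerge keys t l).update d else pvMerge keys t l := by
  unfold pvMerge
  rw [List.filter_append, List.foldl_append]
  by_cases h : pvKeyTuple keys d = t <;> simp [h]

lemma pvMerge_empty_of_not_mem (keys t : List String) (l : List (List (String × String)))
    (h : t ∉ l.map (pvKeyTuple keys)) : pvMerge keys t l = PySem.Dict.empty := by
  unfold pvMerge
  have hnil : l.filter (fun d => pvKeyTuple keys d == t) = [] := by
    rw [List.filter_eq_nil_iff]
    intro d hd hbeq
    exact h ((beq_iff_eq.mp hbeq) ▸ List.mem_map_of_mem hd)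
  rw [hnil]
  rfl

lemma pv_zipfold (keys t : List String) :
    ∀ (l : List (List (String × String))) (m0 : PySem.Dict String String),
      ((l.zip (l.map (pvKeyTuple keys))).foldl
          (fun m p => if p.2 = t then m.update p.1 else m) m0)
        = (l.filter (fun d => pvKeyTuple keys d == t)).foldl (fun m d => m.update d) m0 := by
  intro l
  induction l with
  | nil => intro m0; rfl
  | cons d l ih =>
    intro m0
    simp only [List.map_cons, List.zip_cons_cons, List.foldl_cons, List.filter_cons]
    by_cases h : pvKeyTuple keys d = t
    · simp only [h, beq_self_eq_true, if_true, List.foldl_cons]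
      exact ih _
    · simp only [if_neg h]
      have : (pvKeyTuple keys d == t) = false := beq_eq_false_iff_ne.mpr h
      simp only [this, Bool.false_eq_true, if_false]
      exact ih _

lemma pv_A_items (keys : List String) (l : List (List (String × String)))
    (hN : ∀ d ∈ l, (d.map Prod.fst).Nodup) :
    (l.foldl
      (fun result d =>
        let kt := pvKeyTuple keys d
        if result.contains kt = false then
          result.insert kt (PySem.Dict.mk d)
        else
          result.insert kt ((result.getD kt PySem.Dict.empty).update d))
      (PySem.Dict.empty : PySem.Dict (List String) (PySem.Dict String String))).items
    = (PySem.List.dedup (l.map (pvKeyTuple keys))).map (fun t => (t, pvMerge keys t l)) := by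
  induction l using List.reverseRecOn with
  | nil => rfl
  | append_singleton l d ih =>
    have hNl : ∀ d' ∈ l, (d'.map Prod.fst).Nodup := fun d' hd' => hN d' (by simp [hd'])
    have hNd : (d.map Prod.fst).Nodup := hN d (by simp)
    have ihl := ih hNl
    -- name the accumulated dict and replace it by its items
    set F := (l.foldl
      (fun result d =>
        let kt := pvKeyTuple keys d
        if result.contains kt = false then
          result.insert kt (PySem.Dict.mk d)
        else
          result.insert kt ((result.getD kt PySem.Dict.empty).update d))
      (PySem.Dict.empty : PySem.Dict (List String) (PySem.Dict String String))) with hFdef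
    have hF : F = PySem.Dict.mk
        ((PySem.List.dedup (l.map (pvKeyTuple keys))).map (fun t => (t, pvMerge keys t l))) :=
      PySem.Dict.ext ihl
    rw [List.foldl_append, List.foldl_cons, List.foldl_nil, ← hFdef, hF]
    set G := (PySem.List.dedup (l.map (pvKeyTuple keys))).map (fun t => (t, pvMerge keys t l)) with hGdef
    have hkeys : (PySem.Dict.mk G).keys = PySem.List.dedup (l.map (pvKeyTuple keys)) := by
      rw [PySem.Dict.keys_mk, hGdef, List.map_map]
      have hid : ((fun (x : List String × PySem.Dict String String) => x.1)
          ∘ fun t => (t, pvMerge keys t l)) = id := rfl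
      rw [hid, List.map_id]
    have hknodup : (PySem.Dict.mk G).keys.Nodup := by
      rw [hkeys]; exact PySem.List.nodup_dedup _
    have hcont : (PySem.Dict.mk G).contains (pvKeyTuple keys d)
        = decide (pvKeyTuple keys d ∈ l.map (pvKeyTuple keys)) := by
      rw [PySem.Dict.contains_eq_decide_mem_keys, hkeys]
      simp
    rw [List.map_append, List.map_cons, List.map_nil]
    by_cases hmem : pvKeyTuple keys d ∈ l.map (pvKeyTuple keys)
    · -- key tuple already seen: in-place overwrite of the group entry
      have hc : (PySem.Dict.mk G).contains (pvKeyTuple keys d) = true := by simp [hcont, hmem]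
      have hmemd : pvKeyTuple keys d ∈ PySem.List.dedup (l.map (pvKeyTuple keys)) :=
        (PySem.List.mem_dedup _ _).mpr hmem
      have hitem : (pvKeyTuple keys d, pvMerge keys (pvKeyTuple keys d) l) ∈ (PySem.Dict.mk G).items := by
        show _ ∈ G
        rw [hGdef]
        exact List.mem_map_of_mem hmemd
      have hgetD : (PySem.Dict.mk G).getD (pvKeyTuple keys d) PySem.Dict.empty
          = pvMerge keys (pvKeyTuple keys d) l :=
        PySem.Dict.getD_of_mem_items _ hitem hknodup _
      simp only [hc, Bool.true_eq_false, if_false, hgetD]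
      rw [PySem.Dict.items_insert_of_contains _ _ hc]
      show G.map _ = _
      rw [pv_dedup_append, if_pos hmem, hGdef, List.map_map]
      apply List.map_congr_left
      intro t ht
      by_cases hte : t = pvKeyTuple keys d
      · subst hte
        simp only [Function.comp_apply, beq_self_eq_true, if_true]
        rw [pvMerge_append, if_pos rfl]
      · have : (t == pvKeyTuple keys d) = false := beq_eq_false_iff_ne.mpr hte
        simp only [Function.comp_apply, this, Bool.false_eq_true, if_false]
        rw [pvMerge_append, if_neg (fun he => hte he.symm)]
    · -- fresh key tuple: the group is the single dict d, appended at the end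
      have hc : (PySem.Dict.mk G).contains (pvKeyTuple keys d) = false := by simp [hcont, hmem]
      simp only [hc, if_true]
      rw [PySem.Dict.items_insert_of_not_contains _ _ hc]
      show G ++ _ = _
      rw [pv_dedup_append, if_neg hmem, List.map_append, List.map_cons, List.map_nil]
      congr 1
      · rw [hGdef]
        apply List.map_congr_left
        intro t ht
        have htl : t ∈ l.map (pvKeyTuple keys) := (PySem.List.mem_dedup _ _).mp ht
        have hte : pvKeyTuple keys d ≠ t := fun he => hmem (he ▸ htl)
        rw [pvMerge_append, if_neg hte]
      · rw [pvMerge_append, if_pos rfl, pvMerge_empty_of_not_mem keys _ l hmem,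
          pv_update_empty d hNd]

-- ===== VERDICT (by name: the statement is the Claim_ definition above) =====
theorem join_dicts_by_keys_spec : Claim_equal_join_dicts_by_keys := by
  intro dict_list keys _ hPre
  unfold Spec_join_dicts_by_keys join_dicts_by_keys join_dicts_by_keys_alt
  simp only [PySem.Dict.values]
  rw [pv_A_items keys dict_list (fun d hd => (hPre d hd).1)]
  simp only [List.map_map]
  apply List.map_congr_left
  intro t _
  simp only [Function.comp]
  rw [pv_zipfold]
  rfl
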